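-- pv_equiv track=rewrite | github.com/wangsenouc/homework | 复杂数据结构挖掘/实验1/FPTree.py | sort_frequent_item
-- ===== SOURCE A (Python) =====
-- def sort_frequent_item(database, F_list):
--     '''
--     对database中的每一条transaction按照F_list排序，并且移除不在F_list中的item
--     :param database:
--     :param F_list:
--     :return:
--     '''
--     new_database = []
--     for trans in database:
--         t = []
--         for item in F_list:
--             if item[0] in trans:
--                 t.append(item[0])
--         new_database.append(t)
--     return new_database
-- ===== SOURCE B (Python) =====
-- def sort_frequent_item(database, F_list):
--     # Index F_list once: item name -> list of its positions in F_list.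
--     index = {}
--     for i, item in enumerate(F_list):
--         index.setdefault(item[0], []).append(i)
--     new_database = []
--     for trans in database:
--         positions = set()
--         for x in trans:
--             positions.update(index.get(x, ()))
--         new_database.append([F_list[i][0] for i in sorted(positions)])
--     return new_database
-- ===== Notes on version B (the rewrite author's own statement) =====
-- stated objective: faster
-- what changed: Instead of scanning F_list once per transaction with a linear 'in trans' membership test, B builds a name->positions hash index over F_list once, then per transaction scans only the transaction's own items, collects the matched positions into a set, sorts them and maps them back to names.
import Mathlib
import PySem

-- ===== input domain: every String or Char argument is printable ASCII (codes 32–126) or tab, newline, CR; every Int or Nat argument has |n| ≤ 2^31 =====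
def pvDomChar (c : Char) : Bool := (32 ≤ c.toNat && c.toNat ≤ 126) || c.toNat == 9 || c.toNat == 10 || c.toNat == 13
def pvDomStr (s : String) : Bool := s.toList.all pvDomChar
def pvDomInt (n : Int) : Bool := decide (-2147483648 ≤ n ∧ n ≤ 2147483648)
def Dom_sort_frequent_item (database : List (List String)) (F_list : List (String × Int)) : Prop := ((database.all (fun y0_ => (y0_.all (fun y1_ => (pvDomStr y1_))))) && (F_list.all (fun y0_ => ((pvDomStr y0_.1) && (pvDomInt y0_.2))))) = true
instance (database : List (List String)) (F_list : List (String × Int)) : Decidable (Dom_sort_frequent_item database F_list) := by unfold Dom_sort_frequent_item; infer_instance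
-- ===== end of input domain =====

-- B replaces A's per-transaction scan of F_list by a position index built once over
-- F_list; per transaction it scans the transaction's own items, collects their
-- positions into a set, sorts them and reads the names back (objective: alternative).

-- ===== PORT A =====
def sort_frequent_item (database : List (List String)) (F_list : List (String × Int)) : List (List String) :=
  database.foldl
    (fun new_database trans =>
      new_database ++
        [F_list.foldl (fun t item => if item.1 ∈ trans then t ++ [item.1] else t) []])
    []

-- ===== PORT B =====
-- index = {}; for i, item in enumerate(F_list): index.setdefault(item[0], []).append(i)
def pvIndex (F_list : List (String × Int)) : PySem.Dict String (List Int) :=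
  (PySem.List.enumerate F_list 0).foldl
    (fun d p => d.insert p.2.1 (d.getD p.2.1 [] ++ [p.1])) PySem.Dict.empty

def pvPositions (index : PySem.Dict String (List Int)) (trans : List String) : PySem.Set Int :=
  trans.foldl (fun s x => PySem.Set.update s (index.getD x [])) PySem.Set.empty

def pvRow (F_list : List (String × Int)) (index : PySem.Dict String (List Int))
    (trans : List String) : List String :=
  (PySem.List.sorted (pvPositions index trans) (fun i => i) false).map
    (fun i => (PySem.List.pyGetD F_list i ("", 0)).1)


def sort_frequent_item_alt (database : List (List String)) (F_list : List (String × Int)) : List (List String) :=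
  let index := pvIndex F_list
  database.foldl (fun new_database trans => new_database ++ [pvRow F_list index trans]) []

-- ===== PRECONDITION & SPEC =====
def Spec_sort_frequent_item (database : List (List String)) (F_list : List (String × Int)) (out : List (List String)) : Prop := out = sort_frequent_item_alt database F_list
instance (database : List (List String)) (F_list : List (String × Int)) (out : List (List String)) : Decidable (Spec_sort_frequent_item database F_list out) := by unfold Spec_sort_frequent_item; infer_instance

-- ===== CLAIM (what is proved, stated in full; the proofs are below) =====
def Claim_equal_sort_frequent_item : Prop := ∀ (database : List (List String)) (F_list : List (String × Int)), Dom_sort_frequent_item database F_list → Spec_sort_frequent_item database F_list (sort_frequent_item database F_list)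

-- ===== LEMMAS AND PROOFS =====

theorem indexFold (l : List (Int × String × Int)) (d : PySem.Dict String (List Int)) (x : String) :
    (l.foldl (fun d p => d.insert p.2.1 (d.getD p.2.1 [] ++ [p.1])) d).getD x [] =
      d.getD x [] ++ (l.filter (fun p => p.2.1 == x)).map (·.1) := by
  induction l generalizing d with
  | nil => simp
  | cons p l ih =>
      rw [List.foldl_cons, ih, List.filter_cons]
      by_cases h : p.2.1 = x
      · simp [h]
      · simp [h, PySem.Dict.getD_insert, Ne.symm h]

theorem memFold (trans : List String) (index : PySem.Dict String (List Int))
    (s : PySem.Set Int) (i : Int) :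
    (i ∈ trans.foldl (fun s x => PySem.Set.update s (index.getD x [])) s) ↔
      i ∈ s ∨ ∃ x ∈ trans, i ∈ index.getD x [] := by
  induction trans generalizing s with
  | nil => simp
  | cons y t ih =>
      rw [List.foldl_cons, ih]
      simp [PySem.Set.mem_update]
      tauto

theorem nodupFold (trans : List String) (index : PySem.Dict String (List Int))
    (s : PySem.Set Int) (hs : s.Nodup) :
    (trans.foldl (fun s x => PySem.Set.update s (index.getD x [])) s).Nodup := by
  induction trans generalizing s with
  | nil => exact hs
  | cons y t ih => exact ih _ (PySem.Set.nodup_update _ _ hs)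

theorem enumFilterSnd (trans : List String) (l : List (String × Int)) (s : Int) :
    ((PySem.List.enumerate l s).filter (fun p => decide (p.2.1 ∈ trans))).map (·.2) =
      l.filter (fun it => decide (it.1 ∈ trans)) := by
  induction l generalizing s with
  | nil => simp [PySem.List.enumerate_nil]
  | cons a l ih =>
      rw [PySem.List.enumerate_cons, List.filter_cons, List.filter_cons]
      by_cases h : a.1 ∈ trans <;> simp [h, ih]

theorem foldlAppendIf (trans : List String) (l : List (String × Int)) (acc : List String) :
    l.foldl (fun t item => if item.1 ∈ trans then t ++ [item.1] else t) acc =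
      acc ++ (l.filter (fun item => decide (item.1 ∈ trans))).map (·.1) := by
  induction l generalizing acc with
  | nil => simp
  | cons a l ih =>
      rw [List.foldl_cons, List.filter_cons]
      by_cases h : a.1 ∈ trans <;> simp [h, ih]
theorem row_eq (F_list : List (String × Int)) (trans : List String) :
    pvRow F_list (pvIndex F_list) trans =
      F_list.foldl (fun t item => if item.1 ∈ trans then t ++ [item.1] else t) [] := by
  rw [foldlAppendIf, List.nil_append]
  unfold pvRow pvPositions
  set E := PySem.List.enumerate F_list 0 with hE
  set positions := trans.foldl (fun s x => PySem.Set.update s ((pvIndex F_list).getD x [])) PySem.Set.empty with hP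
  set target : List Int := (E.filter (fun p => decide (p.2.1 ∈ trans))).map (·.1) with hT
  have hsorted : PySem.List.sorted positions (fun i => i) false = target := by
    apply PySem.List.sorted_eq_of_perm_of_pairwise_lt
    · -- target.Perm positions
      have hmemT : ∀ i : Int, i ∈ target ↔ ∃ p ∈ E, p.2.1 ∈ trans ∧ p.1 = i := by
        intro i; rw [hT]; simp [List.mem_filter]
      have hidx : ∀ x i, i ∈ (pvIndex F_list).getD x [] ↔ ∃ p ∈ E, p.2.1 = x ∧ p.1 = i := by
        intro x i
        unfold pvIndex
        rw [← hE, indexFold]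
        simp [List.mem_filter]
      have hmemP : ∀ i : Int, i ∈ positions ↔ ∃ p ∈ E, p.2.1 ∈ trans ∧ p.1 = i := by
        intro i
        rw [hP, memFold]
        simp only [PySem.Set.empty, List.not_mem_nil, false_or, hidx]
        constructor
        · rintro ⟨x, hx, p, hpE, rfl, rfl⟩
          exact ⟨p, hpE, hx, rfl⟩
        · rintro ⟨p, hpE, hpt, rfl⟩
          exact ⟨p.2.1, hpt, p, hpE, rfl, rfl⟩
      have hndT : target.Nodup := by
        have := (PySem.List.pairwise_lt_enumerate F_list 0).filter (fun p => decide (p.2.1 ∈ trans))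
        rw [hT]
        exact (List.pairwise_map.mpr (this.imp (fun h => h))).imp (fun h => ne_of_lt h)
      have hndP : positions.Nodup := nodupFold _ _ _ List.nodup_nil
      exact (List.perm_ext_iff_of_nodup hndT hndP).mpr (fun i => (hmemT i).trans (hmemP i).symm)
    · -- target.Pairwise (<)
      have := (PySem.List.pairwise_lt_enumerate F_list 0).filter (fun p => decide (p.2.1 ∈ trans))
      rw [hT]
      exact List.pairwise_map.mpr (this.imp (fun h => h))
  rw [hsorted, hT, List.map_map]
  have hcongr : ∀ p ∈ E.filter (fun p => decide (p.2.1 ∈ trans)),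
      ((fun i => (PySem.List.pyGetD F_list i ("", 0)).1) ∘ (·.1)) p = p.2.1 := by
    intro p hp
    have hpE : p ∈ E := (List.mem_filter.mp hp).1
    rw [hE, PySem.List.mem_enumerate_iff] at hpE
    obtain ⟨k, hk, rfl⟩ := hpE
    simp [PySem.List.pyGetD_natCast, List.getD_eq_getElem?_getD, hk]
  rw [List.map_congr_left hcongr]
  have : (fun p : Int × String × Int => p.2.1) = (fun q : String × Int => q.1) ∘ (fun p : Int × String × Int => p.2) := rfl
  rw [this, ← List.map_map, hE, enumFilterSnd]

theorem outerFold (g h : List String → List String) (hgh : ∀ t, g t = h t)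
    (db : List (List String)) (acc : List (List String)) :
    db.foldl (fun nd t => nd ++ [g t]) acc = db.foldl (fun nd t => nd ++ [h t]) acc := by
  have : g = h := funext hgh
  rw [this]

-- ===== VERDICT (by name: the statement is the Claim_ definition above) =====
theorem sort_frequent_item_spec : Claim_equal_sort_frequent_item := by
  intro database F_list _
  unfold Spec_sort_frequent_item sort_frequent_item sort_frequent_item_alt
  exact outerFold _ _ (fun t => (row_eq F_list t).symm) database []
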